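-- pv_equiv track=rewrite | github.com/GYan58/lhr-work | src/HRO.py | get_inters
-- ===== SOURCE A (Python) =====
-- def get_inters(Trace):
--     Counters = {}
--     Inters = {}
--     Sizes = {}
--
--     Times = {}
--     for i in range(len(Trace)):
--         Req = Trace[i]
--         I = Req[1]
--         T = Req[0]
--         S = Req[2]
--         if I not in Times.keys():
--             Times[I] = [T]
--         else:
--             Times[I].append(T)
--
--         Sizes[I] = S
--
--     for ky in Times.keys():
--         Counters[ky] = 0
--         inter = [1000000]
--         GTs = Times[ky]
--         if len(GTs) > 1:
--             inter = []
--             for i in range(len(GTs)-1):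
--                 inter.append(GTs[i+1] - GTs[i])
--         Inters[ky] = inter
--     return Inters, Counters, Sizes
-- ===== SOURCE B (Python) =====
-- def get_inters(Trace):
--     # One fused pass: keep only the previous timestamp per id instead of the
--     # full time list, emitting gaps as they appear.
--     Inters = {}
--     Counters = {}
--     Sizes = {}
--     last = {}
--     for T, I, S in Trace:
--         Counters[I] = 0
--         Sizes[I] = S
--         if I in last:
--             Inters[I].append(T - last[I])
--         else:
--             Inters[I] = []
--         last[I] = T
--     return {k: (v if v else [1000000]) for k, v in Inters.items()}, Counters, Sizes
-- ===== Notes on version B (the rewrite author's own statement) =====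
-- stated objective: simpler
-- what changed: B replaces A's two-phase grouping (collect the full time list per id, then a second keyed pass computing pairwise differences) with one fused pass that keeps only the previous timestamp per id and emits each gap immediately, patching single-occurrence ids to [1000000] at the end.
import Mathlib
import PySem

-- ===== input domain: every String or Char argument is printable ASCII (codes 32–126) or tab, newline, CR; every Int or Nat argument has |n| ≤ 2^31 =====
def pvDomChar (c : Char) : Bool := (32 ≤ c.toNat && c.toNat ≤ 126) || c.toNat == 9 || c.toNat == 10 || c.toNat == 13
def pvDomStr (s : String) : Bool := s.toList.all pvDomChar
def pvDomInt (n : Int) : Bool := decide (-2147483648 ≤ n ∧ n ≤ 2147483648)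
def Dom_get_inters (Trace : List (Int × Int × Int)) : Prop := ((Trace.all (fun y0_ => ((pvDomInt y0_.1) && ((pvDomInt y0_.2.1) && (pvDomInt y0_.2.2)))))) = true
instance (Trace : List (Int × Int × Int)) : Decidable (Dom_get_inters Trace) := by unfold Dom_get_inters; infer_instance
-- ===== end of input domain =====

-- B fuses A's two passes into one, keeping only the last timestamp per id; equivalence is proved on all inputs (objective: simpler).

-- ===== PORT A =====
-- inner loop of A's second pass: for i in range(len(GTs)-1): inter.append(GTs[i+1]-GTs[i])
def pvDiffLoop (GTs : List Int) : List Int :=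
  (PySem.List.pyRange 0 ((GTs.length : Int) - 1)).foldl
    (fun inter i => inter ++ [PySem.List.pyGetD GTs (i + 1) 0 - PySem.List.pyGetD GTs i 0]) []

-- first loop of A: build Times (id -> list of timestamps) and Sizes (id -> last size)
def pvStepA (st : PySem.Dict Int (List Int) × PySem.Dict Int Int) (Req : Int × Int × Int) :
    PySem.Dict Int (List Int) × PySem.Dict Int Int :=
  let I := Req.2.1
  let Times := if st.1.contains I = false then st.1.insert I [Req.1]
               else st.1.modify I [] (fun l => l ++ [Req.1])
  (Times, st.2.insert I Req.2.2)

def get_inters (Trace : List (Int × Int × Int)) : (List (Int × List Int)) × (List (Int × Int)) × (List (Int × Int)) :=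
  let TS := Trace.foldl pvStepA (PySem.Dict.empty, PySem.Dict.empty)
  let Times := TS.1
  let IC := Times.keys.foldl
    (fun (st : PySem.Dict Int (List Int) × PySem.Dict Int Int) ky =>
      let Counters := st.2.insert ky 0
      let GTs := Times.getD ky []
      let inter := [(1000000 : Int)]
      let inter := if 1 < GTs.length then pvDiffLoop GTs else inter
      (st.1.insert ky inter, Counters))
    (PySem.Dict.empty, PySem.Dict.empty)
  (IC.1.items, IC.2.items, TS.2.items)

-- ===== PORT B =====
-- single fused pass: Inters (gaps so far), Counters, Sizes, last (id -> previous timestamp)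
def pvStepB (st : PySem.Dict Int (List Int) × PySem.Dict Int Int × PySem.Dict Int Int × PySem.Dict Int Int)
    (Req : Int × Int × Int) :
    PySem.Dict Int (List Int) × PySem.Dict Int Int × PySem.Dict Int Int × PySem.Dict Int Int :=
  let T := Req.1; let I := Req.2.1; let S := Req.2.2
  let Counters := st.2.1.insert I 0
  let Sizes := st.2.2.1.insert I S
  let Inters := match st.2.2.2.get? I with
    | some t => st.1.modify I [] (fun l => l ++ [T - t])
    | none => st.1.insert I []
  (Inters, Counters, Sizes, st.2.2.2.insert I T)

def get_inters_alt (Trace : List (Int × Int × Int)) : (List (Int × List Int)) × (List (Int × Int)) × (List (Int × Int)) :=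
  let st := Trace.foldl pvStepB (PySem.Dict.empty, PySem.Dict.empty, PySem.Dict.empty, PySem.Dict.empty)
  (st.1.items.map (fun kv => (kv.1, if kv.2.isEmpty then [(1000000 : Int)] else kv.2)),
   st.2.1.items, st.2.2.1.items)

-- ===== PRECONDITION & SPEC =====
def Spec_get_inters (Trace : List (Int × Int × Int)) (out : (List (Int × List Int)) × (List (Int × Int)) × (List (Int × Int))) : Prop := out = get_inters_alt Trace
instance (Trace : List (Int × Int × Int)) (out : (List (Int × List Int)) × (List (Int × Int)) × (List (Int × Int))) : Decidable (Spec_get_inters Trace out) := by unfold Spec_get_inters; infer_instance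

-- ===== CLAIM (what is proved, stated in full; the proofs are below) =====
def Claim_equal_get_inters : Prop := ∀ (Trace : List (Int × Int × Int)), Dom_get_inters Trace → Spec_get_inters Trace (get_inters Trace)

-- ===== LEMMAS AND PROOFS =====

-- successive differences of a list (the value Inters[k] holds for a key with >= 2 times)
def pvDiffs : List Int → List Int
  | a :: b :: r => (b - a) :: pvDiffs (b :: r)
  | _ => []

lemma pvDiffs_concat : ∀ (v : List Int), v ≠ [] → ∀ T : Int,
    pvDiffs (v ++ [T]) = pvDiffs v ++ [T - v.getLastD 0]
  | [_], _, _ => rfl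
  | a :: b :: r, _, T => by
    have ih := pvDiffs_concat (b :: r) (by simp) T
    show (b - a) :: pvDiffs ((b :: r) ++ [T]) = ((b - a) :: pvDiffs (b :: r)) ++ [T - (a :: b :: r).getLastD 0]
    rw [ih]
    simp

lemma pvDiffs_eq_map : ∀ (v : List Int),
    pvDiffs v = (List.range (v.length - 1)).map (fun i => v.getD (i + 1) 0 - v.getD i 0)
  | [] => rfl
  | [_] => rfl
  | a :: b :: r => by
    have ih := pvDiffs_eq_map (b :: r)
    show (b - a) :: pvDiffs (b :: r) = _
    rw [ih]
    have hl : (a :: b :: r).length - 1 = ((b :: r).length - 1) + 1 := by simp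
    rw [hl, List.range_succ_eq_map, List.map_cons, List.map_map]
    refine congrArg₂ _ (by simp) ?_
    apply List.map_congr_left
    intro i _
    simp [Function.comp]

lemma pvDiffLoop_eq (v : List Int) (hv : v ≠ []) : pvDiffLoop v = pvDiffs v := by
  unfold pvDiffLoop
  rw [PySem.List.foldl_append_singleton_eq_map]
  have h1 : ((v.length : Int) - 1) = ((v.length - 1 : Nat) : Int) := by
    have : 1 ≤ v.length := List.length_pos_iff.mpr hv
    omega
  rw [h1, PySem.List.pyRange_zero_natCast, List.map_map, pvDiffs_eq_map]
  apply List.map_congr_left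
  intro i hi
  simp only [Function.comp]
  have h2 : ((i : Int) + 1) = ((i + 1 : Nat) : Int) := by push_cast; ring
  rw [h2, PySem.List.pyGetD_natCast, PySem.List.pyGetD_natCast]

lemma pvDiffs_isEmpty (v : List Int) (hv : v ≠ []) :
    (pvDiffs v).isEmpty = !decide (1 < v.length) := by
  match v with
  | [a] => rfl
  | a :: b :: r => simp [pvDiffs]

-- the invariant tying A's first-pass state to B's state
def pvInv (Times : PySem.Dict Int (List Int)) (SizesA : PySem.Dict Int Int)
    (Inters : PySem.Dict Int (List Int)) (Counters : PySem.Dict Int Int)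
    (SizesB : PySem.Dict Int Int) (last : PySem.Dict Int Int) : Prop :=
  SizesB = SizesA ∧
  Counters.items = Times.items.map (fun kv => (kv.1, (0 : Int))) ∧
  Inters.items = Times.items.map (fun kv => (kv.1, pvDiffs kv.2)) ∧
  last.items = Times.items.map (fun kv => (kv.1, kv.2.getLastD 0)) ∧
  Times.keys.Nodup ∧
  ∀ kv ∈ Times.items, kv.2 ≠ ([] : List Int)

lemma pvInv_step (Times : PySem.Dict Int (List Int)) (SizesA : PySem.Dict Int Int)
    (Inters : PySem.Dict Int (List Int)) (Counters SizesB last : PySem.Dict Int Int)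
    (Req : Int × Int × Int)
    (h : pvInv Times SizesA Inters Counters SizesB last) :
    pvInv (pvStepA (Times, SizesA) Req).1 (pvStepA (Times, SizesA) Req).2
      (pvStepB (Inters, Counters, SizesB, last) Req).1
      (pvStepB (Inters, Counters, SizesB, last) Req).2.1
      (pvStepB (Inters, Counters, SizesB, last) Req).2.2.1
      (pvStepB (Inters, Counters, SizesB, last) Req).2.2.2 := by
  obtain ⟨hS, hC, hI, hL, hnd, hne⟩ := h
  obtain ⟨T, I, S⟩ := Req
  have hkC : Counters.keys = Times.keys := by
    simp only [PySem.Dict.keys, hC, List.map_map]; rfl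
  have hkI : Inters.keys = Times.keys := by
    simp only [PySem.Dict.keys, hI, List.map_map]; rfl
  have hkL : last.keys = Times.keys := by
    simp only [PySem.Dict.keys, hL, List.map_map]; rfl
  have hcC : Counters.contains I = Times.contains I := by
    rw [PySem.Dict.contains_eq_decide_mem_keys, PySem.Dict.contains_eq_decide_mem_keys, hkC]
  have hcI : Inters.contains I = Times.contains I := by
    rw [PySem.Dict.contains_eq_decide_mem_keys, PySem.Dict.contains_eq_decide_mem_keys, hkI]
  have hcL : last.contains I = Times.contains I := by
    rw [PySem.Dict.contains_eq_decide_mem_keys, PySem.Dict.contains_eq_decide_mem_keys, hkL]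
  by_cases hc : Times.contains I = true
  · -- I already seen: A appends to Times[I], B appends a gap
    obtain ⟨v, hv⟩ : ∃ v, Times.get? I = some v := by
      cases hg : Times.get? I with
      | none => rw [PySem.Dict.get?_eq_none_iff_contains] at hg; rw [hg] at hc; simp at hc
      | some v => exact ⟨v, rfl⟩
    have hvmem : (I, v) ∈ Times.items := (PySem.Dict.get?_eq_some_iff_mem_items _ _ _ hnd).mp hv
    have hvne : v ≠ [] := hne _ hvmem
    have hndL : last.keys.Nodup := by rw [hkL]; exact hnd
    have hndI : Inters.keys.Nodup := by rw [hkI]; exact hnd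
    have hgL : last.get? I = some (v.getLastD 0) := by
      rw [PySem.Dict.get?_eq_some_iff_mem_items _ _ _ hndL, hL]
      exact List.mem_map.mpr ⟨(I, v), hvmem, rfl⟩
    have hgTd : Times.getD I [] = v := PySem.Dict.getD_of_mem_items _ hvmem hnd []
    have hgId : Inters.getD I [] = pvDiffs v := by
      apply PySem.Dict.getD_of_mem_items _ _ hndI
      rw [hI]; exact List.mem_map.mpr ⟨(I, v), hvmem, rfl⟩
    simp only [pvStepA, pvStepB, hc, hgL, Bool.true_eq_false, if_false]
    simp only [PySem.Dict.modify, hgTd, hgId]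
    have hTit : (Times.insert I (v ++ [T])).items
        = Times.items.map (fun p => if p.1 == I then (I, v ++ [T]) else p) :=
      PySem.Dict.items_insert_of_contains _ _ hc
    refine ⟨by rw [hS], ?_, ?_, ?_, ?_, ?_⟩
    · rw [PySem.Dict.items_insert_of_contains _ _ (by rw [hcC]; exact hc), hC, hTit]
      rw [List.map_map, List.map_map]
      apply List.map_congr_left
      intro kv _
      by_cases hk : kv.1 = I <;> simp [Function.comp, hk]
    · rw [PySem.Dict.items_insert_of_contains _ _ (by rw [hcI]; exact hc), hI, hTit]
      rw [List.map_map, List.map_map]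
      apply List.map_congr_left
      intro kv _
      by_cases hk : kv.1 = I <;>
        simp [Function.comp, hk, pvDiffs_concat v hvne T]
    · rw [PySem.Dict.items_insert_of_contains _ _ (by rw [hcL]; exact hc), hL, hTit]
      rw [List.map_map, List.map_map]
      apply List.map_congr_left
      intro kv _
      by_cases hk : kv.1 = I <;> simp [Function.comp, hk]
    · exact PySem.Dict.nodup_keys_insert _ _ _ hnd
    · intro kv hkv
      rw [hTit] at hkv
      obtain ⟨p, hp, hpe⟩ := List.mem_map.mp hkv
      by_cases hk : p.1 = I
      · simp [hk] at hpe; simp [← hpe]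
      · simp [hk] at hpe; rw [← hpe]; exact hne _ hp
  · -- fresh id
    have hc' : Times.contains I = false := by simpa using hc
    have hgL : last.get? I = none :=
      (PySem.Dict.get?_eq_none_iff_contains _ _).mpr (by rw [hcL]; exact hc')
    simp only [pvStepA, pvStepB, hc', hgL, if_true]
    refine ⟨by rw [hS], ?_, ?_, ?_, ?_, ?_⟩
    · rw [PySem.Dict.items_insert_of_not_contains _ _ (by rw [hcC]; exact hc'), hC,
        PySem.Dict.items_insert_of_not_contains _ _ hc']
      simp
    · rw [PySem.Dict.items_insert_of_not_contains _ _ (by rw [hcI]; exact hc'), hI,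
        PySem.Dict.items_insert_of_not_contains _ _ hc']
      simp [pvDiffs]
    · rw [PySem.Dict.items_insert_of_not_contains _ _ (by rw [hcL]; exact hc'), hL,
        PySem.Dict.items_insert_of_not_contains _ _ hc']
      simp
    · exact PySem.Dict.nodup_keys_insert _ _ _ hnd
    · intro kv hkv
      rw [PySem.Dict.items_insert_of_not_contains _ _ hc'] at hkv
      rcases List.mem_append.mp hkv with hm | hm
      · exact hne _ hm
      · simp at hm; simp [hm]

lemma pvInv_fold : ∀ (l : List (Int × Int × Int)) (Times : PySem.Dict Int (List Int))
    (SizesA : PySem.Dict Int Int) (Inters : PySem.Dict Int (List Int))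
    (Counters SizesB last : PySem.Dict Int Int),
    pvInv Times SizesA Inters Counters SizesB last →
    pvInv (l.foldl pvStepA (Times, SizesA)).1 (l.foldl pvStepA (Times, SizesA)).2
      (l.foldl pvStepB (Inters, Counters, SizesB, last)).1
      (l.foldl pvStepB (Inters, Counters, SizesB, last)).2.1
      (l.foldl pvStepB (Inters, Counters, SizesB, last)).2.2.1
      (l.foldl pvStepB (Inters, Counters, SizesB, last)).2.2.2
  | [], _, _, _, _, _, _, h => h
  | r :: t, Times, SizesA, Inters, Counters, SizesB, last, h => by
    simp only [List.foldl_cons]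
    have hstep := pvInv_step Times SizesA Inters Counters SizesB last r h
    have eA : pvStepA (Times, SizesA) r
        = ((pvStepA (Times, SizesA) r).1, (pvStepA (Times, SizesA) r).2) := rfl
    have eB : pvStepB (Inters, Counters, SizesB, last) r
        = ((pvStepB (Inters, Counters, SizesB, last) r).1,
           (pvStepB (Inters, Counters, SizesB, last) r).2.1,
           (pvStepB (Inters, Counters, SizesB, last) r).2.2.1,
           (pvStepB (Inters, Counters, SizesB, last) r).2.2.2) := rfl
    rw [eA, eB]
    exact pvInv_fold t _ _ _ _ _ _ hstep

-- A's second loop: over distinct fresh keys both accumulators just append their items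
lemma pvLoop2 (Times : PySem.Dict Int (List Int)) :
    ∀ (ks : List Int) (d1 : PySem.Dict Int (List Int)) (d2 : PySem.Dict Int Int),
    ks.Nodup → (∀ k ∈ ks, d1.contains k = false) → (∀ k ∈ ks, d2.contains k = false) →
    (ks.foldl (fun (st : PySem.Dict Int (List Int) × PySem.Dict Int Int) ky =>
        (st.1.insert ky (if 1 < (Times.getD ky []).length then pvDiffLoop (Times.getD ky [])
          else [(1000000 : Int)]), st.2.insert ky (0 : Int))) (d1, d2)).1.items
      = d1.items ++ ks.map (fun k => (k, if 1 < (Times.getD k []).length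
          then pvDiffLoop (Times.getD k []) else [(1000000 : Int)]))
    ∧ (ks.foldl (fun (st : PySem.Dict Int (List Int) × PySem.Dict Int Int) ky =>
        (st.1.insert ky (if 1 < (Times.getD ky []).length then pvDiffLoop (Times.getD ky [])
          else [(1000000 : Int)]), st.2.insert ky (0 : Int))) (d1, d2)).2.items
      = d2.items ++ ks.map (fun k => (k, (0 : Int)))
  | [], d1, d2, _, _, _ => by simp
  | k :: t, d1, d2, hnd, h1, h2 => by
    simp only [List.foldl_cons, List.map_cons]
    have hfresh1 : ∀ k' ∈ t, (d1.insert k (if 1 < (Times.getD k []).length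
        then pvDiffLoop (Times.getD k []) else [(1000000 : Int)])).contains k' = false := by
      intro k' hk'
      have hne : k' ≠ k := by rintro rfl; exact (List.nodup_cons.mp hnd).1 hk'
      rw [PySem.Dict.contains_insert]
      simp [hne, h1 k' (by simp [hk'])]
    have hfresh2 : ∀ k' ∈ t, (d2.insert k (0 : Int)).contains k' = false := by
      intro k' hk'
      have hne : k' ≠ k := by rintro rfl; exact (List.nodup_cons.mp hnd).1 hk'
      rw [PySem.Dict.contains_insert]
      simp [hne, h2 k' (by simp [hk'])]
    have ih := pvLoop2 Times t _ _ (List.Nodup.of_cons hnd) hfresh1 hfresh2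
    refine ⟨?_, ?_⟩
    · rw [ih.1, PySem.Dict.items_insert_of_not_contains _ _ (h1 k (by simp))]
      simp
    · rw [ih.2, PySem.Dict.items_insert_of_not_contains _ _ (h2 k (by simp))]
      simp

theorem pv_main (Trace : List (Int × Int × Int)) : get_inters Trace = get_inters_alt Trace := by
  have hinv := pvInv_fold Trace PySem.Dict.empty PySem.Dict.empty PySem.Dict.empty
    PySem.Dict.empty PySem.Dict.empty PySem.Dict.empty
    ⟨rfl, rfl, rfl, rfl, List.nodup_nil, by intro kv h; simp [PySem.Dict.empty] at h⟩
  set a := Trace.foldl pvStepA (PySem.Dict.empty, PySem.Dict.empty) with ha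
  set b := Trace.foldl pvStepB (PySem.Dict.empty, PySem.Dict.empty, PySem.Dict.empty, PySem.Dict.empty) with hb
  obtain ⟨hS, hC, hI, hL, hnd, hne⟩ := hinv
  unfold get_inters get_inters_alt
  rw [← ha, ← hb]
  simp only
  have h2 := pvLoop2 a.1 a.1.keys PySem.Dict.empty PySem.Dict.empty hnd
    (by intro k _; rfl) (by intro k _; rfl)
  refine Prod.ext ?_ (Prod.ext ?_ ?_)
  · -- Inters component
    rw [h2.1, hI, List.map_map]
    have hkeys : a.1.keys = a.1.items.map (fun kv => kv.1) := rfl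
    rw [hkeys, List.map_map]
    apply List.map_congr_left
    intro kv hkv
    have hvne := hne kv hkv
    have hgd : a.1.getD kv.1 [] = kv.2 := PySem.Dict.getD_of_mem_items _ hkv hnd []
    simp only [Function.comp, hgd]
    rw [pvDiffLoop_eq kv.2 hvne]
    have hie := pvDiffs_isEmpty kv.2 hvne
    by_cases hlen : 1 < kv.2.length
    · simp [hlen] at hie ⊢; simp [hie]
    · simp [hlen] at hie ⊢; simp [hie]
  · -- Counters component
    rw [h2.2, hC,
      show (PySem.Dict.empty : PySem.Dict Int Int).items = [] from rfl,
      show a.1.keys = a.1.items.map (fun kv => kv.1) from rfl,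
      List.nil_append, List.map_map]
    rfl
  · -- Sizes component
    rw [hS]

-- ===== VERDICT (by name: the statement is the Claim_ definition above) =====
theorem get_inters_spec : Claim_equal_get_inters := by
  intro Trace _
  unfold Spec_get_inters
  exact pv_main Trace
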